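-- pv_equiv track=rewrite | github.com/cao13jf/ESDData | utils/tools.py | find_clips
-- ===== SOURCE A (Python) =====
-- def find_clips(frame_idxs):
--     clip_durations = []  # [[start1, end1], ...]
--     gaps = [right - left for left, right in zip(frame_idxs[:-1], frame_idxs[1:])]
--
--     duration = [frame_idxs[0]]
--     for idx, gap in enumerate(gaps):
--         if gap > 1:
--             duration.append(frame_idxs[idx])
--             clip_durations.append(duration[1] - duration[0])
--             duration = [frame_idxs[idx + 1]]
--     duration.append(frame_idxs[-1])
--     clip_durations.append(duration[1] - duration[0])
--
--     return clip_durations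
-- ===== SOURCE B (Python) =====
-- def find_clips(frame_idxs):
--     # a run's duration (last - first) is the telescoping sum of its consecutive gaps,
--     # so just accumulate gap sums, starting a fresh zero accumulator at each gap > 1
--     durations = [0]
--     for left, right in zip(frame_idxs, frame_idxs[1:]):
--         gap = right - left
--         if gap > 1:
--             durations.append(0)
--         else:
--             durations[-1] += gap
--     return durations
-- ===== Notes on version B (the rewrite author's own statement) =====
-- stated objective: simpler
-- what changed: B never tracks run start values or endpoints: it uses the telescoping identity last-first = sum of consecutive gaps, accumulating each run's gap sum in place and starting a fresh zero accumulator at every gap > 1, while A records run starts in a duration pair and emits endpoint differences over an enumerated precomputed gaps list.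
import Mathlib
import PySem

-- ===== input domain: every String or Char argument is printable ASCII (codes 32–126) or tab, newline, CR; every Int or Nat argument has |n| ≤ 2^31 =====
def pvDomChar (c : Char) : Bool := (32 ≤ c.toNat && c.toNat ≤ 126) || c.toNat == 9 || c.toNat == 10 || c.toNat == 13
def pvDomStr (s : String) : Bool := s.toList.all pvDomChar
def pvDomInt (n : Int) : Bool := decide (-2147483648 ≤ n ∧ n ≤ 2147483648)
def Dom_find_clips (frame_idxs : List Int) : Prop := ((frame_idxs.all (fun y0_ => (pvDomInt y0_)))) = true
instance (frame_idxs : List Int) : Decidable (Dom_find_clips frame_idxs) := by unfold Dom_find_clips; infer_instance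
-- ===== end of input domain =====

-- B drops A's run-start bookkeeping entirely: by the telescoping identity last - first =
-- sum of consecutive gaps, it accumulates each run's gap sum, opening a fresh zero
-- accumulator at every gap > 1 (objective: simpler; same O(n) cost).

-- ===== PORT A =====
-- loop body of A's 'for idx, gap in enumerate(gaps)'
def find_clips_step (frame_idxs : List Int)
    (st : List Int × List Int) (p : Int × Int) : List Int × List Int :=
  if p.2 > 1 then
    let duration := st.2 ++ [PySem.List.pyGetD frame_idxs p.1 0]
    let clip_durations := st.1 ++
      [PySem.List.pyGetD duration 1 0 - PySem.List.pyGetD duration 0 0]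
    (clip_durations, [PySem.List.pyGetD frame_idxs (p.1 + 1) 0])
  else st

def find_clips (frame_idxs : List Int) : List Int :=
  let gaps := (List.zip (PySem.List.slice frame_idxs none (some (-1)))
                        (PySem.List.slice frame_idxs (some 1) none)).map
              (fun lr => lr.2 - lr.1)
  let st := (PySem.List.enumerate gaps 0).foldl (find_clips_step frame_idxs)
              ([], [PySem.List.pyGetD frame_idxs 0 0])
  let duration := st.2 ++ [PySem.List.pyGetD frame_idxs (-1) 0]
  st.1 ++ [PySem.List.pyGetD duration 1 0 - PySem.List.pyGetD duration 0 0]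

-- ===== PORT B =====
-- loop body of B's 'for left, right in zip(frame_idxs, frame_idxs[1:])'
def find_clips_alt_step (st : List Int) (lr : Int × Int) : List Int :=
  let gap := lr.2 - lr.1
  if gap > 1 then st ++ [0]
  else st.dropLast ++ [st.getLastD 0 + gap]   -- durations[-1] += gap (st is never empty)

def find_clips_alt (frame_idxs : List Int) : List Int :=
  (List.zip frame_idxs (PySem.List.slice frame_idxs (some 1) none)).foldl
    find_clips_alt_step [0]

-- ===== PRECONDITION & SPEC =====
-- Pre_ excludes only the empty list, on which the Python A raises IndexError (frame_idxs[0]).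
def Pre_find_clips (frame_idxs : List Int) : Prop := frame_idxs ≠ []
instance (frame_idxs : List Int) : Decidable (Pre_find_clips frame_idxs) := by
  unfold Pre_find_clips; infer_instance

def pvWitness_find_clips : List Int := [1, 2, 5, 6, 9]

def Spec_find_clips (frame_idxs : List Int) (out : List Int) : Prop := out = find_clips_alt frame_idxs
instance (frame_idxs : List Int) (out : List Int) : Decidable (Spec_find_clips frame_idxs out) := by unfold Spec_find_clips; infer_instance

-- ===== CLAIM (what is proved, stated in full; the proofs are below) =====
def Claim_equal_find_clips : Prop := ∀ (frame_idxs : List Int), Dom_find_clips frame_idxs → Pre_find_clips frame_idxs → Spec_find_clips frame_idxs (find_clips frame_idxs)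

-- ===== LEMMAS AND PROOFS =====

-- common specification: emitted clip durations and the start of the final run,
-- for a run currently starting at s with previous element p and remaining input rest
def pvGo (s p : Int) : List Int → List Int × Int
  | [] => ([], s)
  | x :: r =>
    if x - p > 1 then
      let e := pvGo x x r
      ((p - s) :: e.1, e.2)
    else pvGo s x r

-- A's loop body, re-expressed on the pair (left, right) itself
def pvStepP (st : List Int × List Int) (lr : Int × Int) : List Int × List Int :=
  if lr.2 - lr.1 > 1 then
    let duration := st.2 ++ [lr.1]
    (st.1 ++ [PySem.List.pyGetD duration 1 0 - PySem.List.pyGetD duration 0 0], [lr.2])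
  else st

lemma foldA_eq_foldP (xs : List Int) (ps : List (Int × Int)) : ∀ (k : Nat) (st : List Int × List Int),
    (∀ j, j < ps.length →
      xs.getD (k + j) 0 = (ps.getD j (0, 0)).1 ∧ xs.getD (k + j + 1) 0 = (ps.getD j (0, 0)).2) →
    (PySem.List.enumerate (ps.map (fun lr => lr.2 - lr.1)) (k : Int)).foldl
        (find_clips_step xs) st
      = ps.foldl pvStepP st := by
  induction ps with
  | nil => intro k st _; simp
  | cons hd tl ih =>
    intro k st h
    have h0 := h 0 (by simp)
    simp only [List.getD_cons_zero, Nat.add_zero] at h0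
    simp only [List.map_cons, PySem.List.enumerate_cons, List.foldl_cons]
    have hk1 : (k : Int) + 1 = ((k + 1 : Nat) : Int) := by push_cast; ring
    rw [hk1, ih (k + 1)]
    · congr 1
      simp only [find_clips_step, pvStepP, PySem.List.pyGetD_natCast, h0.1]
      rw [show (k : Int) + 1 = ((k + 1 : Nat) : Int) from hk1]
      simp only [PySem.List.pyGetD_natCast]
      rw [h0.2]
    · intro j hj
      have := h (j + 1) (by simpa using Nat.succ_lt_succ hj)
      simpa [Nat.add_assoc, Nat.add_comm 1 j, Nat.add_left_comm] using this

lemma foldP_eq_go (rest : List Int) : ∀ (p s : Int) (clips : List Int),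
    ((List.zip (p :: rest).dropLast (p :: rest).tail).foldl pvStepP (clips, [s]))
      = (clips ++ (pvGo s p rest).1, [(pvGo s p rest).2]) := by
  induction rest with
  | nil => intro p s clips; simp [pvGo]
  | cons x r ih =>
    intro p s clips
    have hz : List.zip (p :: x :: r).dropLast (p :: x :: r).tail
        = (p, x) :: List.zip (x :: r).dropLast (x :: r).tail := by
      simp [List.dropLast_cons_of_ne_nil]
    rw [hz]
    simp only [List.foldl_cons, pvStepP, pvGo]
    by_cases hc : x - p > 1
    · simp only [if_pos hc, ih]
      simp [PySem.List.pyGetD]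
    · simp only [if_neg hc, ih]

lemma pairs_hyp (x : Int) (rest : List Int) :
    ∀ j, j < (List.zip (x :: rest).dropLast (x :: rest).tail).length →
      (x :: rest).getD (0 + j) 0 = ((List.zip (x :: rest).dropLast (x :: rest).tail).getD j (0, 0)).1 ∧
      (x :: rest).getD (0 + j + 1) 0 = ((List.zip (x :: rest).dropLast (x :: rest).tail).getD j (0, 0)).2 := by
  intro j hj
  simp only [Nat.zero_add]
  have hjr : j < rest.length := by
    simpa [List.length_zip] using hj
  have hzip : (List.zip (x :: rest).dropLast (x :: rest).tail).getD j (0, 0)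
      = ((x :: rest).dropLast[j]'(by simp [hjr]), (x :: rest).tail[j]'(by simpa using hjr)) := by
    rw [List.getD_eq_getElem _ _ hj]
    exact List.getElem_zip
  rw [hzip]
  constructor
  · rw [List.getD_eq_getElem _ _ (show j < (x :: rest).length by simp; omega),
        List.getElem_dropLast]
  · rw [List.getD_eq_getElem _ _ (show j + 1 < (x :: rest).length by simp; omega),
        List.getElem_tail]

-- B's gap-sum fold computes the same emitted durations: the pending accumulator holds p - s
lemma foldB_eq_go (rest : List Int) : ∀ (p s : Int) (clips : List Int),
    (List.zip (p :: rest) rest).foldl find_clips_alt_step (clips ++ [p - s])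
      = clips ++ (pvGo s p rest).1
          ++ [(p :: rest).getLast (by simp) - (pvGo s p rest).2] := by
  induction rest with
  | nil => intro p s clips; simp [pvGo]
  | cons x r ih =>
    intro p s clips
    have hz : List.zip (p :: x :: r) (x :: r) = (p, x) :: List.zip (x :: r) r := by
      simp
    rw [hz]
    simp only [List.foldl_cons, find_clips_alt_step, pvGo]
    by_cases hc : x - p > 1
    · simp only [if_pos hc]
      have : (clips ++ [p - s]) ++ [(0 : Int)] = (clips ++ [p - s]) ++ [x - x] := by
        norm_num
      rw [this, ih x x (clips ++ [p - s])]
      rw [List.getLast_cons (by simp : (x :: r) ≠ [])]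
      simp
    · simp only [if_neg hc]
      have : (clips ++ [p - s]).dropLast ++ [(clips ++ [p - s]).getLastD 0 + (x - p)]
          = clips ++ [x - s] := by
        simp
      rw [this, ih x s clips]
      rw [List.getLast_cons (by simp : (x :: r) ≠ [])]

-- ===== VERDICT (by name: the statement is the Claim_ definition above) =====
theorem find_clips_spec : Claim_equal_find_clips := by
  intro xs _ hpre
  unfold Spec_find_clips
  cases xs with
  | nil => exact absurd rfl hpre
  | cons x rest =>
    unfold find_clips find_clips_alt
    simp only [PySem.List.slice_to_neg_one, PySem.List.slice_from_one]
    rw [show ((0 : Int)) = ((0 : Nat) : Int) from rfl,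
        foldA_eq_foldP (x :: rest) _ 0 _ (pairs_hyp x rest)]
    simp only [Int.natCast_zero]
    have h0 : PySem.List.pyGetD (x :: rest) 0 0 = x := by simp [PySem.List.pyGetD]
    rw [h0, foldP_eq_go rest x x]
    have hB : (List.zip (x :: rest) ((x :: rest).tail)).foldl find_clips_alt_step [0]
        = [] ++ (pvGo x x rest).1
            ++ [(x :: rest).getLast (by simp) - (pvGo x x rest).2] := by
      have : ([(0 : Int)]) = [] ++ [x - x] := by norm_num
      rw [List.tail_cons, this]
      exact foldB_eq_go rest x x []
    rw [List.tail_cons] at hB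
    simp only [List.tail_cons]
    rw [hB]
    rw [PySem.List.pyGetD_neg_one (x :: rest) 0 (by simp)]
    simp [PySem.List.pyGetD]
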